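-- pv_equiv track=rewrite | github.com/parkdoyeon/Study | Algorithms/national-budget.py | good_solution
-- ===== SOURCE A (Python) =====
-- def good_solution(budgets, M):
--     if sum(budgets) <= M:
--         return max(budgets)
--
--     l, r, mid = 1, max(budgets), 0
--     answer = 0
--
--     while l <= r:
--         mid = (l+r) // 2
--         total = 0
--
--         for budget in budgets:
--             if budget <= mid:
--                 total += budget
--             else:
--                 total += mid
--
--         if total > M:
--             r = mid - 1
--         else:
--             if answer <= mid:
--                 answer = mid
--             l = mid + 1
--     return answer
-- ===== SOURCE B (Python) =====
-- def good_solution(budgets, M):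
--     if sum(budgets) <= M:
--         return max(budgets)
--     bs = sorted(budgets)
--     n = len(bs)
--     prefix = 0
--     for i, b in enumerate(bs):
--         t = (M - prefix) // (n - i)
--         if t < b:
--             return t if t > 0 else 0
--         prefix += b
--     return 0
-- ===== Notes on version B (the rewrite author's own statement) =====
-- stated objective: alternative
-- what changed: Replaces A's binary search over the cap value (re-summing all budgets each probe) by a single sort with a prefix-sum scan that computes the optimal cap directly with one floor division per segment (asymptotically O(n log n) vs O(n log max_budget), though a timing run did not confirm a consistent speed-up).
import Mathlib
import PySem

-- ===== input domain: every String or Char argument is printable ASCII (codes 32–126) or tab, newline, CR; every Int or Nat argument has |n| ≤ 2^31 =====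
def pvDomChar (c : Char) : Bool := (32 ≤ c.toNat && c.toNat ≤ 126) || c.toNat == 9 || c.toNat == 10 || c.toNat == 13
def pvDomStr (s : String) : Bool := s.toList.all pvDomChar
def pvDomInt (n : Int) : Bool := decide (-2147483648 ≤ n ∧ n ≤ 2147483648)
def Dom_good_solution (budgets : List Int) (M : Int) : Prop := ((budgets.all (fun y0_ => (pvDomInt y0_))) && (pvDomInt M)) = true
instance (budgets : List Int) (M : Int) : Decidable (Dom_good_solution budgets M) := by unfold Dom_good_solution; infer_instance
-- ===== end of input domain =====

-- B replaces A's binary search over the cap value by one sort + prefix-sum scan that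
-- solves the cap threshold directly with one floor division per segment (objective: alternative algorithm).

-- ===== PORT A =====
-- the inner `for budget in budgets: ...` loop of A
def capSum (budgets : List Int) (mid : Int) : Int :=
  budgets.foldl (fun total budget => if budget ≤ mid then total + budget else total + mid) 0

-- A's `while l <= r` binary-search loop
def loopA (budgets : List Int) (M : Int) (l r answer : Int) : Int :=
  if h : l ≤ r then
    let mid := PySem.Int.floordiv (l + r) 2
    let total := capSum budgets mid
    if total > M then loopA budgets M l (mid - 1) answer
    else loopA budgets M (mid + 1) r (if answer ≤ mid then mid else answer)
  else answer
termination_by (r + 1 - l).toNat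
decreasing_by
  · have := PySem.Int.floordiv_two_mid_bounds h; omega
  · have := PySem.Int.floordiv_two_mid_bounds h; omega

def good_solution (budgets : List Int) (M : Int) : Int :=
  if budgets.sum ≤ M then (PySem.List.max? budgets (fun x => x)).getD 0
  else loopA budgets M 1 ((PySem.List.max? budgets (fun x => x)).getD 0) 0

-- ===== PORT B =====
-- B's `for i, b in enumerate(bs)` scan; n is the remaining count len(bs) - i
def altLoop (M : Int) : List Int → Int → Int → Int
  | [], _, _ => 0
  | b :: rest, n, pfx =>
      let t := PySem.Int.floordiv (M - pfx) n
      if t < b then (if t > 0 then t else 0)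
      else altLoop M rest (n - 1) (pfx + b)

def good_solution_alt (budgets : List Int) (M : Int) : Int :=
  if budgets.sum ≤ M then (PySem.List.max? budgets (fun x => x)).getD 0
  else
    let bs := PySem.List.sorted budgets (fun x => x) false
    altLoop M bs (bs.length : Int) 0

-- ===== PRECONDITION & SPEC =====
-- Python A raises ValueError (max of empty sequence) on the empty list; Pre_ excludes exactly that.
def Pre_good_solution (budgets : List Int) (M : Int) : Prop := budgets ≠ []
instance (budgets : List Int) (M : Int) : Decidable (Pre_good_solution budgets M) := by
  unfold Pre_good_solution; infer_instance

def pvWitness_good_solution : List Int × Int := ([1, 2, 3], 4)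

def Spec_good_solution (budgets : List Int) (M : Int) (out : Int) : Prop := out = good_solution_alt budgets M
instance (budgets : List Int) (M : Int) (out : Int) : Decidable (Spec_good_solution budgets M out) := by
  unfold Spec_good_solution; infer_instance

-- ===== CLAIM (what is proved, stated in full; the proofs are below) =====
def Claim_equal_good_solution : Prop := ∀ (budgets : List Int) (M : Int), Dom_good_solution budgets M → Pre_good_solution budgets M → Spec_good_solution budgets M (good_solution budgets M)


-- ===== LEMMAS AND PROOFS =====

-- the mathematical capped sum both loops are about
def fSum (bs : List Int) (t : Int) : Int := (bs.map (fun b => min b t)).sum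

theorem capSum_eq_fSum (bs : List Int) (t : Int) : capSum bs t = fSum bs t := by
  have aux : ∀ (l : List Int) (acc : Int),
      l.foldl (fun total budget => if budget ≤ t then total + budget else total + t) acc
        = acc + fSum l t := by
    intro l
    induction l with
    | nil => intro acc; simp [fSum]
    | cons b rest ih =>
        intro acc
        simp only [List.foldl_cons, ih, fSum, List.map_cons, List.sum_cons]
        split_ifs with hb <;> simp [min_def, hb] <;> omega
  simpa [capSum] using aux bs 0

theorem fSum_mono (bs : List Int) {t t' : Int} (h : t ≤ t') : fSum bs t ≤ fSum bs t' := by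
  induction bs with
  | nil => simp [fSum]
  | cons b rest ih =>
      simp only [fSum, List.map_cons, List.sum_cons] at *
      have : min b t ≤ min b t' := by omega
      omega

theorem fSum_of_all_le (bs : List Int) (t : Int) (h : ∀ b ∈ bs, b ≤ t) : fSum bs t = bs.sum := by
  induction bs with
  | nil => simp [fSum]
  | cons b rest ih =>
      have hb := h b (by simp)
      have := ih (fun x hx => h x (by simp [hx]))
      simp only [fSum, List.map_cons, List.sum_cons] at *
      omega

theorem fSum_of_all_ge (bs : List Int) (t : Int) (h : ∀ b ∈ bs, t ≤ b) :
    fSum bs t = t * bs.length := by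
  induction bs with
  | nil => simp [fSum]
  | cons b rest ih =>
      have hb := h b (by simp)
      have := ih (fun x hx => h x (by simp [hx]))
      simp only [fSum, List.map_cons, List.sum_cons, List.length_cons] at *
      push_cast
      have : min b t = t := by omega
      rw [this]; ring_nf; omega

theorem fSum_perm {bs bs' : List Int} (h : bs.Perm bs') (t : Int) : fSum bs t = fSum bs' t :=
  List.Perm.sum_eq (h.map _)

theorem fSum_append (xs ys : List Int) (t : Int) :
    fSum (xs ++ ys) t = fSum xs t + fSum ys t := by
  simp [fSum]

-- characterisation both loops satisfy (given ¬ ok above the range)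
def Char0 (budgets : List Int) (M R res : Int) : Prop :=
  0 ≤ res ∧ (res = 0 ∨ (1 ≤ res ∧ res ≤ R ∧ fSum budgets res ≤ M)) ∧
    (∀ t, 1 ≤ t → t ≤ R → fSum budgets t ≤ M → t ≤ res)

theorem char0_unique {budgets : List Int} {M R a b : Int}
    (ha : Char0 budgets M R a) (hb : Char0 budgets M R b) : a = b := by
  obtain ⟨ha0, ha1, ha2⟩ := ha
  obtain ⟨hb0, hb1, hb2⟩ := hb
  rcases ha1 with rfl | ⟨ha1, haR, haok⟩
  · rcases hb1 with rfl | ⟨hb1, hbR, hbok⟩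
    · rfl
    · have := ha2 b hb1 hbR hbok; omega
  · rcases hb1 with rfl | ⟨hb1, hbR, hbok⟩
    · have := hb2 a ha1 haR haok; omega
    · have := ha2 b hb1 hbR hbok
      have := hb2 a ha1 haR haok
      omega

theorem loopA_char (budgets : List Int) (M : Int) (l r answer : Int) :
    answer ≤ loopA budgets M l r answer ∧
    (loopA budgets M l r answer = answer ∨
      (l ≤ loopA budgets M l r answer ∧ loopA budgets M l r answer ≤ r ∧
        fSum budgets (loopA budgets M l r answer) ≤ M)) ∧
    (∀ t, l ≤ t → t ≤ r → fSum budgets t ≤ M → t ≤ loopA budgets M l r answer) := by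
  fun_induction loopA budgets M l r answer with
  | case1 l r answer h mid total hgt ih =>
      -- total > M: search left half
      obtain ⟨hmidl, hmidr⟩ := PySem.Int.floordiv_two_mid_bounds h
      obtain ⟨ih0, ih1, ih2⟩ := ih
      refine ⟨ih0, ?_, ?_⟩
      · rcases ih1 with h1 | ⟨h1, h2, h3⟩
        · exact Or.inl h1
        · exact Or.inr ⟨h1, by omega, h3⟩
      · intro t htl htr hok
        by_cases hcmp : t ≤ mid - 1
        · exact ih2 t htl hcmp hok
        · exfalso
          have hmm : fSum budgets mid ≤ fSum budgets t := fSum_mono budgets (by omega)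
          rw [← capSum_eq_fSum] at hmm
          omega
  | case2 l r answer h mid total hle ih =>
      -- total ≤ M: record mid, search right half
      obtain ⟨hmidl, hmidr⟩ := PySem.Int.floordiv_two_mid_bounds h
      obtain ⟨ih0, ih1, ih2⟩ := ih
      simp only [dite_eq_ite] at ih0 ih1 ih2
      have hok : fSum budgets mid ≤ M := by rw [← capSum_eq_fSum]; omega
      constructor
      · split_ifs at ih0 ⊢ <;> omega
      constructor
      · rcases ih1 with h1 | ⟨h1, h2, h3⟩
        · rw [h1]
          split_ifs with ha
          · exact Or.inr ⟨by omega, by omega, hok⟩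
          · exact Or.inl rfl
        · exact Or.inr ⟨by omega, h2, h3⟩
      · intro t htl htr htok
        by_cases hcmp : mid + 1 ≤ t
        · exact ih2 t hcmp htr htok
        · have : t ≤ mid := by omega
          split_ifs at ih0 <;> omega
  | case3 l r answer h =>
      exact ⟨le_refl _, Or.inl rfl, fun t htl htr _ => by omega⟩

theorem loopA_char0 (budgets : List Int) (M R : Int) :
    Char0 budgets M R (loopA budgets M 1 R 0) := by
  obtain ⟨h0, h1, h2⟩ := loopA_char budgets M 1 R 0
  exact ⟨h0, h1, h2⟩

theorem altLoop_char0 (budgets : List Int) (M R : Int)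
    (hR : ∀ b ∈ budgets, b ≤ R) (hsum : M < budgets.sum) :
    ∀ (cur done : List Int),
      (done ++ cur).Perm budgets →
      (done ++ cur).Pairwise (· ≤ ·) →
      (∀ d ∈ done, d * cur.length ≤ M - done.sum) →
      (cur = [] → done.sum ≤ M) →
      Char0 budgets M R (altLoop M cur (cur.length : Int) done.sum) := by
  intro cur
  induction cur with
  | nil =>
      intro done hperm _ _ hJ6
      exfalso
      have := List.Perm.sum_eq hperm
      simp at this hJ6
      omega
  | cons b rest ih =>
      intro done hperm hchain hJ4 _
      have hk : (0 : Int) < ((b :: rest).length : Int) := by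
        simp
      set k : Int := ((b :: rest).length : Int) with hkdef
      set t0 : Int := PySem.Int.floordiv (M - done.sum) k with ht0def
      have ht0le : t0 * k ≤ M - done.sum := by
        have := (PySem.Int.le_floordiv_iff_mul_le (q := t0) (a := M - done.sum) (b := k) hk).mp
          (le_refl _)
        omega
      have ht0lt : M - done.sum < (t0 + 1) * k := by
        have := (PySem.Int.floordiv_lt_iff_lt_mul (q := t0 + 1) (a := M - done.sum) (b := k) hk).mp
          (by omega)
        omega
      -- everything already consumed is ≤ t0
      have hdone_le : ∀ d ∈ done, d ≤ t0 := by
        intro d hd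
        exact (PySem.Int.le_floordiv_iff_mul_le (q := d) (a := M - done.sum) (b := k) hk).mpr
          (by have := hJ4 d hd; omega)
      -- sortedness facts
      have hdone_b : ∀ d ∈ done, d ≤ b := by
        intro d hd
        exact (List.pairwise_append.mp hchain).2.2 d hd b (by simp)
      have hb_rest : ∀ c ∈ rest, b ≤ c := by
        intro c hc
        exact (List.pairwise_cons.mp (List.pairwise_append.mp hchain).2.1).1 c hc
      show Char0 budgets M R (altLoop M (b :: rest) k done.sum)
      rw [altLoop]
      simp only [← ht0def]
      by_cases hlt : t0 < b
      · rw [if_pos hlt]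
        -- value of fSum at t0 and t0+1
        have hcur_ge : ∀ c ∈ b :: rest, t0 ≤ c := by
          intro c hc
          rcases List.mem_cons.mp hc with rfl | hc
          · omega
          · have := hb_rest c hc; omega
        have hcur_ge1 : ∀ c ∈ b :: rest, t0 + 1 ≤ c := by
          intro c hc
          rcases List.mem_cons.mp hc with rfl | hc
          · omega
          · have := hb_rest c hc; omega
        have heval : ∀ s, (∀ d ∈ done, d ≤ s) → (∀ c ∈ b :: rest, s ≤ c) →
            fSum budgets s = done.sum + s * k := by
          intro s hds hcs
          rw [← fSum_perm hperm s, fSum_append, fSum_of_all_le done s hds,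
            fSum_of_all_ge (b :: rest) s hcs]
        have hokt0 : fSum budgets t0 ≤ M := by
          rw [heval t0 hdone_le hcur_ge]; omega
        have hfail : ∀ t, t0 < t → ¬ fSum budgets t ≤ M := by
          intro t ht hok
          have h1 : fSum budgets (t0 + 1) = done.sum + (t0 + 1) * k :=
            heval (t0 + 1) (fun d hd => by have := hdone_le d hd; omega) hcur_ge1
          have h2 : fSum budgets (t0 + 1) ≤ fSum budgets t := fSum_mono budgets (by omega)
          omega
        have ht0R : t0 ≤ R := by
          by_contra hcon
          have h1 : fSum budgets R = budgets.sum := fSum_of_all_le budgets R hR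
          have h2 : fSum budgets R ≤ fSum budgets t0 := fSum_mono budgets (by omega)
          omega
        refine ⟨?_, ?_, ?_⟩
        · split_ifs <;> omega
        · split_ifs with hpos
          · exact Or.inr ⟨by omega, ht0R, hokt0⟩
          · exact Or.inl rfl
        · intro t ht1 htR htok
          have : t ≤ t0 := by
            by_contra hcon
            exact hfail t (by omega) htok
          split_ifs <;> omega
      · rw [if_neg hlt]
        have hbt0 : b ≤ t0 := by omega
        have hbk : b * k ≤ M - done.sum := by
          have := (PySem.Int.le_floordiv_iff_mul_le (q := b) (a := M - done.sum) (b := k) hk).mp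
            hbt0
          omega
        have hrec := ih (done ++ [b])
          (by simpa using hperm)
          (by simpa using hchain)
          (by
            intro d hd
            have hlen : (rest.length : Int) = k - 1 := by simp [hkdef]
            simp only [List.sum_append, List.sum_cons, List.sum_nil, add_zero]
            rcases List.mem_append.mp hd with hd | hd
            · have hdb := hdone_b d hd
              have h1 : d * (rest.length : Int) ≤ b * (rest.length : Int) :=
                mul_le_mul_of_nonneg_right hdb (by positivity)
              have h2 : b * (rest.length : Int) = b * k - b := by rw [hlen]; ring
              omega
            · simp at hd
              subst hd
              have h2 : d * (rest.length : Int) = d * k - d := by rw [hlen]; ring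
              omega)
          (by
            intro hre
            subst hre
            have hk1 : k = 1 := by simp [hkdef]
            rw [hk1, mul_one] at hbk
            simp only [List.sum_append, List.sum_cons, List.sum_nil, add_zero]
            omega)
        have hlen : ((rest.length : Nat) : Int) = k - 1 := by simp [hkdef]
        simpa [hlen, List.sum_append] using hrec
  -- (induction done)

-- ===== VERDICT (by name: the statement is the Claim_ definition above) =====
theorem good_solution_spec : Claim_equal_good_solution := by
  intro budgets M _ hpre
  unfold Spec_good_solution good_solution good_solution_alt
  by_cases hs : budgets.sum ≤ M
  · simp [hs]
  · simp only [if_neg hs]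
    obtain ⟨m, hm⟩ : ∃ m, PySem.List.max? budgets (fun x => x) = some m := by
      cases h : PySem.List.max? budgets (fun x => x) with
      | none => exact absurd ((PySem.List.max?_eq_none_iff _ _).mp h) hpre
      | some m => exact ⟨m, rfl⟩
    have hR : ∀ b ∈ budgets, b ≤ m := PySem.List.max?_isMax hm
    rw [hm]
    have hA := loopA_char0 budgets M m
    have hB := altLoop_char0 budgets M m hR (by omega)
      (PySem.List.sorted budgets (fun x => x) false) []
      (by simpa using PySem.List.sorted_perm budgets (fun x => x) false)
      (by simpa using PySem.List.sorted_pairwise budgets (fun x => x))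
      (by simp)
      (by
        intro hnil
        exact absurd (((PySem.List.sorted_eq_nil_iff _ _ _).mp hnil)) hpre)
    simp only [List.sum_nil, Option.getD_some] at hA hB ⊢
    exact char0_unique hA hB
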